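-- pv_equiv track=rewrite | github.com/jlanej/kmer_denovo_filter | src/kmer_denovo_filter/core/bam_scanner.py | _extract_softclips
-- ===== SOURCE A (Python) =====
-- def _extract_softclips(cigartuples):
--     """Extract left and right soft-clip lengths from CIGAR tuples.
--
--     Args:
--         cigartuples: List of ``(operation, length)`` tuples from
--             ``pysam.AlignedSegment.cigartuples``.  May be ``None``
--             for unmapped reads.
--
--     Returns:
--         ``(softclip_left, softclip_right)`` tuple of integers.
--     """
--     if not cigartuples:
--         return (0, 0)
--     # CIGAR ops: 4 = CSOFT_CLIP, 5 = CHARD_CLIP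
--     # Hard clips may appear outside soft clips: e.g. 5H10S80M5S3H
--     left = 0
--     for op, length in cigartuples:
--         if op == 4:  # soft clip
--             left = length
--             break
--         elif op == 5:  # hard clip — skip and keep looking
--             continue
--         else:
--             break
--
--     right = 0
--     for op, length in reversed(cigartuples):
--         if op == 4:
--             right = length
--             break
--         elif op == 5:
--             continue
--         else:
--             break
--
--     # Avoid double-counting when there is only one non-hard-clip CIGAR op
--     non_hard = [t for t in cigartuples if t[0] != 5]
--     if len(non_hard) == 1 and non_hard[0][0] == 4:
--         right = 0
--
--     return (left, right)
-- ===== SOURCE B (Python) =====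
-- def _extract_softclips(cigartuples):
--     """Extract left and right soft-clip lengths from CIGAR tuples.
--
--     Single forward pass with an accumulator: tracks how many non-hard-clip
--     ops were seen, the contribution of the first one (left), whether that
--     first one was a soft clip, and the contribution of the most recent one
--     (right, overwritten as the scan advances).
--     """
--     left = right = 0
--     seen = 0
--     first_soft = False
--     for op, length in cigartuples or ():
--         if op == 5:  # hard clip: invisible to the state machine
--             continue
--         seen += 1
--         if seen == 1:
--             first_soft = (op == 4)
--             left = length if op == 4 else 0
--         right = length if op == 4 else 0
--     if seen == 1 and first_soft:
--         right = 0
--     return (left, right)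
-- ===== Notes on version B (the rewrite author's own statement) =====
-- stated objective: alternative
-- what changed: Replaces A's three traversals (forward early-exit scan, reversed early-exit scan, and a filter pass for the guard) with a single forward fold over an accumulator state machine tracking (left, right, seen-count, first-op-was-soft).
import Mathlib
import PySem

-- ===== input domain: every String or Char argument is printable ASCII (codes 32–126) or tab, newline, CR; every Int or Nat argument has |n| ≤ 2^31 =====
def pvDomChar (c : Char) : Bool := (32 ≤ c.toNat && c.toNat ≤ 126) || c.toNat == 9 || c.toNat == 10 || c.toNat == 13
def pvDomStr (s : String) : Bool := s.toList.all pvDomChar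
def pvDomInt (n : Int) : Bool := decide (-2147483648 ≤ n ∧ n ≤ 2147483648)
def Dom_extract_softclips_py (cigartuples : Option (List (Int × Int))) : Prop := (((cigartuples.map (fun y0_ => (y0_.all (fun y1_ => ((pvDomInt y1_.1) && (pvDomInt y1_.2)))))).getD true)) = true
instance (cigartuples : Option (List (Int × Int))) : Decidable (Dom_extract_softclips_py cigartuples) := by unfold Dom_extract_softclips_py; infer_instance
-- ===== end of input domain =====

-- B replaces A's two early-exit scans (forward + reversed) plus filter pass with ONE forward
-- fold over an accumulator state machine (objective: alternative; same O(n) cost).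


-- ===== PORT A =====
def pvLeftScan : List (Int × Int) → Int
  | [] => 0
  | (op, length) :: rest =>
    if op = 4 then length
    else if op = 5 then pvLeftScan rest
    else 0

def extract_softclips_py (cigartuples : Option (List (Int × Int))) : Int × Int :=
  match cigartuples with
  | none => (0, 0)
  | some ts =>
    if ts = [] then (0, 0)
    else
      let left := pvLeftScan ts
      let right := pvLeftScan ts.reverse
      let nonHard := ts.filter (fun t => t.1 ≠ 5)
      if nonHard.length = 1 ∧ (nonHard.headD (0, 0)).1 = 4 then (left, 0)
      else (left, right)

-- ===== PORT B =====
-- one forward fold; state = (left, right, seen, first_soft), exactly Source B's loop variables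
def pvStep (s : Int × Int × Int × Bool) (t : Int × Int) : Int × Int × Int × Bool :=
  if t.1 = 5 then s
  else
    let seen' := s.2.2.1 + 1
    ( if seen' = 1 then (if t.1 = 4 then t.2 else 0) else s.1,
      if t.1 = 4 then t.2 else 0,
      seen',
      if seen' = 1 then decide (t.1 = 4) else s.2.2.2 )

def extract_softclips_py_alt (cigartuples : Option (List (Int × Int))) : Int × Int :=
  let st := (cigartuples.getD []).foldl pvStep (0, 0, 0, false)
  if st.2.2.1 = 1 ∧ st.2.2.2 = true then (st.1, 0)
  else (st.1, st.2.1)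

-- ===== PRECONDITION & SPEC =====
def Spec_extract_softclips_py (cigartuples : Option (List (Int × Int))) (out : Int × Int) : Prop := out = extract_softclips_py_alt cigartuples
instance (cigartuples : Option (List (Int × Int))) (out : Int × Int) : Decidable (Spec_extract_softclips_py cigartuples out) := by unfold Spec_extract_softclips_py; infer_instance

-- ===== CLAIM (what is proved, stated in full; the proofs are below) =====
def Claim_equal_extract_softclips_py : Prop := ∀ (cigartuples : Option (List (Int × Int))), Dom_extract_softclips_py cigartuples → Spec_extract_softclips_py cigartuples (extract_softclips_py cigartuples)

-- ===== LEMMAS AND PROOFS =====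
-- the state B's fold maintains, expressed over the hard-clip-filtered prefix
def pvStateOf (nh : List (Int × Int)) : Int × Int × Int × Bool :=
  ( if (nh.headD (0, 0)).1 = 4 then (nh.headD (0, 0)).2 else 0,
    if (nh.getLastD (0, 0)).1 = 4 then (nh.getLastD (0, 0)).2 else 0,
    (nh.length : Int),
    decide ((nh.headD (0, 0)).1 = 4) )

theorem pvStep_snoc (nh : List (Int × Int)) (t : Int × Int) (h : t.1 ≠ 5) :
    pvStep (pvStateOf nh) t = pvStateOf (nh ++ [t]) := by
  cases nh with
  | nil => simp [pvStep, pvStateOf, h]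
  | cons a l =>
    have hlen : ¬ (((a :: l).length : Int) + 1 = 1) := by
      simp only [List.length_cons]; push_cast; omega
    have hlen0 : ¬ (((l.length : Int)) + 1 = 0) := by omega
    have hlast : ((a :: (l ++ [t])).getLast?).getD (0, 0) = t := by
      rw [← List.cons_append, List.getLast?_concat]; rfl
    simp [pvStep, pvStateOf, h, hlen, hlen0, List.length_cons, hlast]

theorem pvFold_inv (ts nh : List (Int × Int)) :
    ts.foldl pvStep (pvStateOf nh) = pvStateOf (nh ++ ts.filter (fun t => t.1 ≠ 5)) := by
  induction ts generalizing nh with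
  | nil => simp
  | cons t rest ih =>
    by_cases h : t.1 = 5
    · simpa [List.foldl_cons, pvStep, h, List.filter_cons, h] using ih nh
    · rw [List.foldl_cons, pvStep_snoc nh t h, ih (nh ++ [t])]
      simp [h]

-- left/right scans of A read the two ends of the hard-clip-filtered list
theorem pvLeftScan_filter (ts : List (Int × Int)) :
    pvLeftScan ts = (if ((ts.filter (fun t => t.1 ≠ 5)).headD (0, 0)).1 = 4
      then ((ts.filter (fun t => t.1 ≠ 5)).headD (0, 0)).2 else 0) := by
  induction ts with
  | nil => simp [pvLeftScan]
  | cons hd tl ih =>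
    obtain ⟨op, len⟩ := hd
    by_cases h5 : op = 5
    · simpa [pvLeftScan, h5] using ih
    · by_cases h4 : op = 4 <;> simp [pvLeftScan, h4, h5]

theorem pvFilter_reverse_headD (ts : List (Int × Int)) :
    (ts.reverse.filter (fun t => t.1 ≠ 5)).headD (0, 0)
      = (ts.filter (fun t => t.1 ≠ 5)).getLastD (0, 0) := by
  rw [List.filter_reverse]
  cases h : ts.filter (fun t => t.1 ≠ 5) with
  | nil => simp
  | cons a l => simp [List.getLastD_eq_getLast?, ← List.head?_reverse]

-- ===== VERDICT (by name: the statement is the Claim_ definition above) =====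
theorem extract_softclips_py_spec : Claim_equal_extract_softclips_py := by
  intro cigartuples _
  unfold Spec_extract_softclips_py extract_softclips_py extract_softclips_py_alt
  cases cigartuples with
  | none => rfl
  | some ts =>
    have hfold : ts.foldl pvStep (0, 0, 0, false)
        = pvStateOf (ts.filter (fun t => t.1 ≠ 5)) := by
      have h0 : pvStateOf ([] : List (Int × Int)) = (0, 0, 0, false) := by
        simp [pvStateOf]
      simpa [h0] using pvFold_inv ts []
    simp only [Option.getD_some, hfold]
    by_cases hts : ts = []
    · subst hts; simp [pvStateOf]
    · simp only [hts, if_false]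
      rw [pvLeftScan_filter ts, pvLeftScan_filter ts.reverse, pvFilter_reverse_headD]
      unfold pvStateOf
      cases h : ts.filter (fun t => t.1 ≠ 5) with
      | nil => simp
      | cons a l =>
        by_cases hlen : l.length = 0
        · have hl : l = [] := List.length_eq_zero_iff.mp hlen
          subst hl
          by_cases h4 : a.1 = 4 <;> simp [h4]
        · by_cases h4 : a.1 = 4 <;> simp [h4]
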